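-- pv_equiv track=rewrite | github.com/AlfieT37/road-usage | iot_functions.py | tot_num_groups
-- ===== SOURCE A (Python) =====
-- def tot_num_groups(group_list):
--     total_groups = group_list[-1]  # Max number of groups
--     sum_val_list = []  # List containing total number of elements for each group
--
--     for j in range(total_groups):
--         sum_val = 0
--         for i in range(len(group_list)):
--             if group_list[i] == j:
--                 sum_val += 1
--             else:
--                 continue
--         sum_val_list.append(sum_val)
--
--     return sum_val_list
-- ===== SOURCE B (Python) =====
-- def tot_num_groups(group_list):
--     total_groups = group_list[-1]
--     counts = {}
--     for v in group_list:
--         counts[v] = counts.get(v, 0) + 1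
--     return [counts.get(j, 0) for j in range(total_groups)]
-- ===== Notes on version B (the rewrite author's own statement) =====
-- stated objective: faster
-- what changed: Replaces A's per-candidate full-list scan (one pass over the whole list for every group index) with a single counting pass building a dict, then one lookup per group index.
import Mathlib
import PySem

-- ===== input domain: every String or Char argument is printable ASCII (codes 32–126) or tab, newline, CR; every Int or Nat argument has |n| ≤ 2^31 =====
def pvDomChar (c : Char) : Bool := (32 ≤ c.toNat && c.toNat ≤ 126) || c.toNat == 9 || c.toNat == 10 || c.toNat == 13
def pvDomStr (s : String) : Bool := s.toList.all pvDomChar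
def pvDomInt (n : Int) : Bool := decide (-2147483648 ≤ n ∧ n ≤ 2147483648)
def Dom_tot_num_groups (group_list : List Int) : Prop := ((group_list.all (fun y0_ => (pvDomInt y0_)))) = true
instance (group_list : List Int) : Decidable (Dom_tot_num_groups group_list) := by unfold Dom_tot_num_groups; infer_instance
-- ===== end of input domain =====

-- ===== PORT A =====
-- B replaces A's per-group full-list scan with one counting pass over the list plus one lookup per group index.
def tot_num_groups (group_list : List Int) : List Int :=
  match PySem.List.pyGet? group_list (-1) with
  | none => []  -- Python raises IndexError here; excluded by Pre_
  | some total_groups =>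
    (PySem.List.pyRange 0 total_groups 1).foldl
      (fun sum_val_list j =>
        sum_val_list ++
          [(PySem.List.pyRange 0 (PySem.List.len group_list) 1).foldl
            (fun sum_val i =>
              if PySem.List.pyGetD group_list i 0 = j then sum_val + 1 else sum_val) 0])
      []

-- ===== PORT B =====
def tot_num_groups_alt (group_list : List Int) : List Int :=
  match PySem.List.pyGet? group_list (-1) with
  | none => []  -- Python raises IndexError here; excluded by Pre_
  | some total_groups =>
    let counts := group_list.foldl
      (fun d v => d.insert v (d.getD v 0 + 1)) (PySem.Dict.empty : PySem.Dict Int Int)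
    (PySem.List.pyRange 0 total_groups 1).map (fun j => counts.getD j 0)

-- ===== PRECONDITION & SPEC =====
-- Pre_ excludes only the empty list, on which both Pythons raise IndexError when reading the last element.
def Pre_tot_num_groups (group_list : List Int) : Prop := group_list ≠ []
instance (group_list : List Int) : Decidable (Pre_tot_num_groups group_list) := by
  unfold Pre_tot_num_groups; infer_instance
def pvWitness_tot_num_groups : List Int := [0, 1, 2]
def Spec_tot_num_groups (group_list : List Int) (out : List Int) : Prop := out = tot_num_groups_alt group_list
instance (group_list : List Int) (out : List Int) : Decidable (Spec_tot_num_groups group_list out) := by unfold Spec_tot_num_groups; infer_instance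

-- ===== CLAIM (what is proved, stated in full; the proofs are below) =====
def Claim_equal_tot_num_groups : Prop := ∀ (group_list : List Int), Dom_tot_num_groups group_list → Pre_tot_num_groups group_list → Spec_tot_num_groups group_list (tot_num_groups group_list)

-- ===== LEMMAS AND PROOFS =====

-- A's inner index loop counts the occurrences of j in the list.
theorem tot_num_groups_inner_count (l : List Int) (j : Int) :
    (PySem.List.pyRange 0 (PySem.List.len l) 1).foldl
      (fun sum_val i => if PySem.List.pyGetD l i 0 = j then sum_val + 1 else sum_val) (0 : Int)
      = (l.count j : Int) := by
  rw [PySem.List.foldl_pyRange_zero_pyGetD l 0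
        (fun sum_val v => if v = j then sum_val + 1 else sum_val) 0]
  simp only [PySem.List.foldl_ite_eq_foldl_filter, PySem.List.foldl_add, List.map_const',
    List.sum_replicate, Int.nsmul_eq_mul, mul_one, zero_add, Nat.cast_inj]
  rw [List.count_eq_length_filter]
  congr 2

-- B's dict loop is a counter: looking up j yields the count of j.
theorem tot_num_groups_counts_getD (l : List Int) (j : Int) :
    (l.foldl (fun d v => d.insert v (d.getD v 0 + 1))
        (PySem.Dict.empty : PySem.Dict Int Int)).getD j 0 = (l.count j : Int) := by
  simp only [PySem.Dict.foldl_insert_getD_add_one_eq_counter, PySem.Dict.counter_eq_foldl,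
    PySem.Dict.getD_foldl_modify_add_one, PySem.Dict.getD_empty, zero_add]

-- ===== VERDICT (by name: the statement is the Claim_ definition above) =====
theorem tot_num_groups_spec : Claim_equal_tot_num_groups := by
  intro group_list _ _
  unfold Spec_tot_num_groups tot_num_groups tot_num_groups_alt
  cases hg : PySem.List.pyGet? group_list (-1) with
  | none => rfl
  | some total_groups =>
    simp only [PySem.List.foldl_append_singleton_eq_map, List.nil_append]
    exact List.map_congr_left (fun j _ => by
      rw [tot_num_groups_inner_count, tot_num_groups_counts_getD])
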